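-- pv_equiv track=rewrite | github.com/mitesh1691/Who_ate_my_code | src/Round_3_Solutions.py | square_of_sum_of_digits
-- ===== SOURCE A (Python) =====
-- def square_of_sum_of_digits(num):
--     if num < 0:
--         raise ValueError("Input should be a non-negative integer.")
--
--     sum_of_digits = 0
--
--     while num > 0:
--         digit = num % 10
--         sum_of_digits += digit
--         num //= 10
--
--     square_of_sum = sum_of_digits ** 2
--     return square_of_sum
-- ===== SOURCE B (Python) =====
-- def square_of_sum_of_digits(num):
--     if num < 0:
--         raise ValueError("Input should be a non-negative integer.")
--     total = sum(int(c) for c in str(num))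
--     return total ** 2
-- ===== Notes on version B (the rewrite author's own statement) =====
-- stated objective: idiomatic
-- what changed: Digit sum is computed over the decimal string representation (most-significant-first) instead of extracting digits least-significant-first with % 10 and //= 10 in a while-loop.
import Mathlib
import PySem

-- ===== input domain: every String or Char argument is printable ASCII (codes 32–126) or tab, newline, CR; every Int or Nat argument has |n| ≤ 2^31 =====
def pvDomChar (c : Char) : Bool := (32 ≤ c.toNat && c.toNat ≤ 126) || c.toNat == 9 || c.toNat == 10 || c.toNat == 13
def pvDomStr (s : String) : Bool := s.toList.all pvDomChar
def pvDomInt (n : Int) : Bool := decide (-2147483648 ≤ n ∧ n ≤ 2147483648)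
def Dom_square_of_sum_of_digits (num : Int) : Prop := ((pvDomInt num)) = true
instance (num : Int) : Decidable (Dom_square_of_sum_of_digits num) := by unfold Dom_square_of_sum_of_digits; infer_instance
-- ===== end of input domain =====

-- B computes the digit sum over the decimal string str(num) (most-significant-first)
-- instead of A's while-loop extracting digits least-significant-first with % 10 and //= 10.
-- On num < 0 both Pythons raise ValueError; those inputs are outside Pre_.

-- ===== PORT A =====
-- the while-loop: while num > 0: sum_of_digits += num % 10; num //= 10
def sodLoopA (num sum_of_digits : Int) : Int :=
  if 0 < num then
    sodLoopA (PySem.Int.floordiv num 10) (sum_of_digits + PySem.Int.mod num 10)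
  else sum_of_digits
termination_by num.toNat
decreasing_by
  simp only [PySem.Int.floordiv]
  rename_i h
  have h1 : num.fdiv 10 = num / 10 := Int.fdiv_eq_ediv_of_nonneg _ (by omega)
  have h2 : num / 10 < num := by omega
  have h3 : 0 ≤ num / 10 := by positivity
  omega

def square_of_sum_of_digits (num : Int) : Int :=
  -- num < 0: the Python raises ValueError here (excluded by Pre_)
  let sum_of_digits := sodLoopA num 0
  sum_of_digits ^ 2

-- ===== PORT B =====
def square_of_sum_of_digits_alt (num : Int) : Int :=
  -- num < 0: the Python raises ValueError here (excluded by Pre_)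
  -- total = sum(int(c) for c in str(num)); int(c) on a digit char is c.toNat - 48 (exact there)
  let total : Int := (((PySem.Int.toStr num).toList).map (fun c => ((c.toNat : Int) - 48))).sum
  total ^ 2

-- ===== PRECONDITION & SPEC =====
-- A (and B) raise ValueError on negative input.
def Pre_square_of_sum_of_digits (num : Int) : Prop := 0 ≤ num
instance (num : Int) : Decidable (Pre_square_of_sum_of_digits num) := by
  unfold Pre_square_of_sum_of_digits; infer_instance

def pvWitness_square_of_sum_of_digits : Int := 42

def Spec_square_of_sum_of_digits (num : Int) (out : Int) : Prop := out = square_of_sum_of_digits_alt num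
instance (num : Int) (out : Int) : Decidable (Spec_square_of_sum_of_digits num out) := by
  unfold Spec_square_of_sum_of_digits; infer_instance

-- ===== CLAIM (what is proved, stated in full; the proofs are below) =====
def Claim_equal_square_of_sum_of_digits : Prop := ∀ (num : Int), Dom_square_of_sum_of_digits num → Pre_square_of_sum_of_digits num → Spec_square_of_sum_of_digits num (square_of_sum_of_digits num)

-- ===== LEMMAS AND PROOFS =====

-- reference digit sum of a natural number
def pvDsum (n : Nat) : Nat :=
  if n = 0 then 0 else n % 10 + pvDsum (n / 10)
decreasing_by exact Nat.div_lt_self (by omega) (by omega)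

lemma pvDigitChar_toNat (d : Nat) (hd : d < 10) : (Nat.digitChar d).toNat = 48 + d := by
  interval_cases d <;> decide

lemma pvToDigits_sum (n : Nat) :
    ((Nat.toDigits 10 n).map (fun c => ((c.toNat : Int) - 48))).sum = (pvDsum n : Int) := by
  induction n using Nat.strong_induction_on with
  | _ n ih =>
    rw [Nat.toDigits_eq_if (by omega)]
    by_cases h : n < 10
    · simp only [if_pos h, List.map, List.sum_cons, List.sum_nil,
        pvDigitChar_toNat n h]
      rw [pvDsum]
      by_cases h0 : n = 0
      · subst h0; rw [pvDsum]; simp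
      · rw [if_neg h0, Nat.div_eq_of_lt h, Nat.mod_eq_of_lt h, pvDsum]
        simp
    · rw [if_neg h, List.map_append, List.sum_append]
      rw [ih (n / 10) (Nat.div_lt_self (by omega) (by omega))]
      simp only [List.map, List.sum_cons, List.sum_nil,
        pvDigitChar_toNat (n % 10) (Nat.mod_lt n (by omega))]
      conv_rhs => rw [pvDsum]
      rw [if_neg (by omega : ¬ n = 0)]
      push_cast
      ring

lemma pvLoopA_eq (k : Nat) : ∀ (num acc : Int), num.toNat = k →
    sodLoopA num acc = acc + (pvDsum num.toNat : Int) := by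
  induction k using Nat.strong_induction_on with
  | _ k ih =>
    intro num acc hk
    rw [sodLoopA]
    by_cases h : 0 < num
    · rw [if_pos h]
      have hfd : PySem.Int.floordiv num 10 = num / 10 := by
        simp [PySem.Int.floordiv, Int.fdiv_eq_ediv_of_nonneg _ (by omega : (0:Int) ≤ 10)]
      have hmd : PySem.Int.mod num 10 = num % 10 := by
        simp [PySem.Int.mod, Int.fmod_eq_emod_of_nonneg _ (by omega : (0:Int) ≤ 10)]
      have hlt : (PySem.Int.floordiv num 10).toNat < k := by
        rw [hfd]; omega
      rw [ih _ hlt _ _ rfl, hfd, hmd]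
      have hv : (num / 10).toNat = num.toNat / 10 := by
        omega
      rw [hv]
      conv_rhs => rw [pvDsum]
      rw [if_neg (by omega : ¬ num.toNat = 0)]
      push_cast
      omega
    · rw [if_neg h]
      have : num.toNat = 0 := by omega
      rw [this, pvDsum]
      simp

-- ===== VERDICT (by name: the statement is the Claim_ definition above) =====
theorem square_of_sum_of_digits_spec : Claim_equal_square_of_sum_of_digits := by
  intro num _ hpre
  have hnn : (0:Int) ≤ num := hpre
  unfold Spec_square_of_sum_of_digits square_of_sum_of_digits square_of_sum_of_digits_alt
  have htl : (PySem.Int.toStr num).toList = PySem.Int.toChars num := PySem.Int.toList_toStr num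
  rw [htl]
  have hch : PySem.Int.toChars num = Nat.toDigits 10 num.toNat := by
    simp [PySem.Int.toChars, if_neg (by omega : ¬ num < 0)]
  rw [hch, pvToDigits_sum, pvLoopA_eq num.toNat num 0 rfl]
  simp
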